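-- pv_equiv track=rewrite | github.com/emiperez95/dailyDracula | src/build_data.py | _join_paragraphs
-- ===== SOURCE A (Python) =====
-- def _prettify(text: str) -> str:
--     """Turn Gutenberg's `--` into a real em-dash for display. Only applied to
--     prose text, not to anchor lines (those are already consumed by the regexes).
--     """
--     # Collapse three-hyphen typos first, then two-hyphen → em-dash.
--     text = text.replace("---", "\u2014").replace("--", "\u2014")
--     return text
--
-- def _join_paragraphs(lines: list[str]) -> str:
--     """Join a list of raw lines into paragraph-preserving body text."""
--     paragraphs: list[list[str]] = [[]]
--     for ln in lines:
--         if ln.strip() == "":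
--             if paragraphs[-1]:
--                 paragraphs.append([])
--         else:
--             paragraphs[-1].append(ln.strip())
--     parts = [" ".join(p) for p in paragraphs if p]
--     return _prettify("\n\n".join(parts).strip())
-- ===== SOURCE B (Python) =====
-- def _prettify(text: str) -> str:
--     text = text.replace("---", "\u2014").replace("--", "\u2014")
--     return text
--
-- def _join_paragraphs(lines: list[str]) -> str:
--     # Single pass with two string accumulators: finished text and the current
--     # paragraph; no nested lists, no filter pass, no final strip needed.
--     out = ""
--     cur = ""
--     for ln in lines:
--         word = ln.strip()
--         if word:
--             if cur:
--                 cur += " "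
--                 cur += word
--             else:
--                 cur = word
--         elif cur:
--             if out:
--                 out += "\n\n"
--                 out += cur
--             else:
--                 out = cur
--             cur = ""
--     if cur:
--         if out:
--             out += "\n\n"
--             out += cur
--         else:
--             out = cur
--     return _prettify(out)
-- ===== Notes on version B (the rewrite author's own statement) =====
-- stated objective: alternative
-- what changed: Replaces A's list-of-lists paragraph buffer plus join/filter/strip post-passes by a single pass that folds the lines into two string accumulators (finished text, current paragraph), emitting separators inline so no final strip or filter is needed.
import Mathlib
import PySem

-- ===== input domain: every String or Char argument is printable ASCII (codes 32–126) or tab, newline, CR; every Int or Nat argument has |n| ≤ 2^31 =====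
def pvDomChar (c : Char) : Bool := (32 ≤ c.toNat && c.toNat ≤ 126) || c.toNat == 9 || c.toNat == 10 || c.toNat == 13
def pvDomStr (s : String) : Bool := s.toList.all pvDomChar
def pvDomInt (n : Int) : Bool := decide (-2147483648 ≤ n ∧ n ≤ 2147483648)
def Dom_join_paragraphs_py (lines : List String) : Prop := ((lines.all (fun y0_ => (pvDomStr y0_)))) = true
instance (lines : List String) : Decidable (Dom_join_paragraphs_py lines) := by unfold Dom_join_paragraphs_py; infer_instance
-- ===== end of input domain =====

set_option maxHeartbeats 1000000


-- B folds the lines once into two string accumulators (finished text, current paragraph)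
-- instead of A's list-of-lists buffer followed by join/filter/strip passes; same cost, same values.

-- ===== PORT A =====
-- _prettify: text.replace("---", "—").replace("--", "—")
def pvPrettify (text : String) : String :=
  PySem.Str.replace (PySem.Str.replace text "---" "—") "--" "—"

def join_paragraphs_py (lines : List String) : String :=
  let paragraphs : List (List String) :=
    lines.foldl (fun paragraphs ln =>
      if PySem.Str.strip ln = "" then
        if PySem.List.pyGetD paragraphs (-1) [] ≠ [] then paragraphs ++ [[]] else paragraphs
      else paragraphs.dropLast ++ [PySem.List.pyGetD paragraphs (-1) [] ++ [PySem.Str.strip ln]])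
      [[]]
  let parts := (paragraphs.filter (fun p => p ≠ [])).map (fun p => PySem.Str.join " " p)
  pvPrettify (PySem.Str.strip (PySem.Str.join "\n\n" parts))

-- ===== PORT B =====
def pvAltStep (s : String × String) (ln : String) : String × String :=
  let word := PySem.Str.strip ln
  if word ≠ "" then
    (s.1, if s.2 ≠ "" then s.2 ++ " " ++ word else word)
  else if s.2 ≠ "" then
    ((if s.1 ≠ "" then s.1 ++ "\n\n" ++ s.2 else s.2), "")
  else s

def join_paragraphs_py_alt (lines : List String) : String :=
  let s := lines.foldl pvAltStep ("", "")
  pvPrettify (if s.2 ≠ "" then (if s.1 ≠ "" then s.1 ++ "\n\n" ++ s.2 else s.2) else s.1)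

-- ===== PRECONDITION & SPEC =====
def Spec_join_paragraphs_py (lines : List String) (out : String) : Prop := out = join_paragraphs_py_alt lines
instance (lines : List String) (out : String) : Decidable (Spec_join_paragraphs_py lines out) := by unfold Spec_join_paragraphs_py; infer_instance

-- ===== CLAIM (what is proved, stated in full; the proofs are below) =====
def Claim_equal_join_paragraphs_py : Prop := ∀ (lines : List String), Dom_join_paragraphs_py lines → Spec_join_paragraphs_py lines (join_paragraphs_py lines)

-- ===== LEMMAS AND PROOFS =====

-- a nonempty char list with no leading/trailing whitespace
def pvGood (c : List Char) : Prop :=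
  c ≠ [] ∧ (∀ h ∈ c.head?, PySem.Chars.isspace h = false) ∧
    (∀ h ∈ c.getLast?, PySem.Chars.isspace h = false)

theorem pvGood_strip (ln : List Char) (h : PySem.Chars.strip ln ≠ []) :
    pvGood (PySem.Chars.strip ln) := by
  unfold PySem.Chars.strip PySem.Chars.rstrip PySem.Chars.lstrip at *
  set p := PySem.Chars.isspace with hp
  set y := List.dropWhile p ln with hy
  set z := List.dropWhile p y.reverse with hz
  have hzne : z ≠ [] := by
    intro h0; apply h; rw [h0]; rfl
  refine ⟨h, ?_, ?_⟩
  · intro c hc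
    -- head of z.reverse is head of y, which dropWhile made non-space
    have hsuf : z <:+ y.reverse := List.dropWhile_suffix p
    obtain ⟨t, ht⟩ := hsuf
    have hyeq : y = z.reverse ++ t.reverse := by
      have := congrArg List.reverse ht
      simpa using this.symm
    have hy' : y.head? = some c := by
      rw [hyeq, List.head?_append_of_ne_nil _ (by simpa using hzne)]
      exact hc
    have h1 := List.head?_dropWhile_not p ln
    rw [← hy] at h1
    rw [hy'] at h1
    exact h1
  · intro c hc
    rw [List.getLast?_reverse] at hc
    have h1 := List.head?_dropWhile_not p y.reverse
    rw [← hz, hc] at h1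
    exact h1

theorem pvStrip_eq_self (c : List Char) (h : pvGood c) : PySem.Chars.strip c = c := by
  obtain ⟨hne, hh, hl⟩ := h
  unfold PySem.Chars.strip PySem.Chars.lstrip PySem.Chars.rstrip
  have h1 : List.dropWhile PySem.Chars.isspace c = c := by
    cases c with
    | nil => rfl
    | cons a l =>
      have : PySem.Chars.isspace a = false := hh a rfl
      simp [this]
  rw [h1]
  have h2 : List.dropWhile PySem.Chars.isspace c.reverse = c.reverse := by
    cases hcr : c.reverse with
    | nil => rfl
    | cons a l =>
      have ha : c.getLast? = some a := by rw [← List.head?_reverse, hcr]; rfl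
      have : PySem.Chars.isspace a = false := hl a (by rw [ha]; rfl)
      simp [this]
  rw [h2, List.reverse_reverse]

theorem pvGood_ne (s : String) (h : pvGood s.toList) : s ≠ "" := by
  intro h0
  exact h.1 (String.toList_eq_nil_iff.mpr h0)

theorem pvGood_append_mid (a sep b : List Char) (ha : pvGood a) (hb : pvGood b) :
    pvGood (a ++ sep ++ b) := by
  obtain ⟨hane, hah, hal⟩ := ha
  obtain ⟨hbne, hbh, hbl⟩ := hb
  refine ⟨by simp [hbne], ?_, ?_⟩
  · intro c hc
    rw [List.append_assoc, List.head?_append_of_ne_nil _ hane] at hc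
    exact hah c hc
  · intro c hc
    rw [List.getLast?_append_of_ne_nil _ hbne] at hc
    exact hbl c hc

theorem pvGood_join (sep : List Char) :
    ∀ (parts : List (List Char)), parts ≠ [] → (∀ p ∈ parts, pvGood p) →
      pvGood (PySem.Chars.join sep parts)
  | [], hne, _ => absurd rfl hne
  | [a], _, h => by
      rw [PySem.Chars.join_singleton]; exact h a (by simp)
  | a :: b :: m, _, h => by
      rw [PySem.Chars.join_cons_cons]
      exact pvGood_append_mid _ _ _ (h a (by simp))
        (pvGood_join sep (b :: m) (by simp) (fun p hp => h p (by simp [hp])))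

theorem pvChars_join_append_singleton (sep x : List Char) :
    ∀ (xs : List (List Char)), xs ≠ [] →
      PySem.Chars.join sep (xs ++ [x]) = PySem.Chars.join sep xs ++ sep ++ x
  | [], hne => absurd rfl hne
  | [a], _ => by
      simp [PySem.Chars.join_cons_cons, PySem.Chars.join_singleton]
  | a :: b :: m, _ => by
      have h1 : (a :: b :: m) ++ [x] = a :: (b :: (m ++ [x])) := rfl
      rw [h1, PySem.Chars.join_cons_cons, PySem.Chars.join_cons_cons]
      rw [show b :: (m ++ [x]) = (b :: m) ++ [x] from rfl,
        pvChars_join_append_singleton sep x (b :: m) (by simp)]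
      simp [List.append_assoc]

theorem pvJoin_nil (sep : String) : PySem.Str.join sep [] = "" := by
  rw [← String.toList_inj]
  simp [PySem.Str.toList_join, PySem.Chars.join_nil]

theorem pvJoin_singleton (sep x : String) : PySem.Str.join sep [x] = x := by
  rw [← String.toList_inj]
  simp [PySem.Str.toList_join, PySem.Chars.join_singleton]

theorem pvJoin_append_singleton (sep : String) (xs : List String) (x : String) (h : xs ≠ []) :
    PySem.Str.join sep (xs ++ [x]) = PySem.Str.join sep xs ++ sep ++ x := by
  rw [← String.toList_inj]
  simp only [PySem.Str.toList_join, String.toList_append, List.map_append, List.map_cons,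
    List.map_nil]
  rw [pvChars_join_append_singleton sep.toList x.toList (xs.map String.toList)
    (by simpa using h)]

theorem pvGoodPar (p : List String) (hp : p ≠ []) (hw : ∀ w ∈ p, pvGood w.toList) :
    pvGood (PySem.Str.join " " p).toList := by
  rw [PySem.Str.toList_join]
  refine pvGood_join _ _ (by simpa using hp) ?_
  intro q hq
  simp only [List.mem_map] at hq
  obtain ⟨w, hw', rfl⟩ := hq
  exact hw w hw'

theorem pvGoodOut (init : List (List String)) (hne : init ≠ [])
    (hinit : ∀ p ∈ init, p ≠ []) (hg : ∀ p ∈ init, ∀ w ∈ p, pvGood w.toList) :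
    pvGood (PySem.Str.join "\n\n" (init.map (fun p => PySem.Str.join " " p))).toList := by
  rw [PySem.Str.toList_join]
  refine pvGood_join _ _ (by simpa using hne) ?_
  intro q hq
  simp only [List.map_map, List.mem_map] at hq
  obtain ⟨p, hp, rfl⟩ := hq
  exact pvGoodPar p (hinit p hp) (hg p hp)

theorem pvStr_strip_good (s : String) (h : pvGood s.toList) : PySem.Str.strip s = s := by
  rw [← String.toList_inj, PySem.Str.toList_strip, pvStrip_eq_self _ h]

theorem pvStr_good_strip (ln : String) (h : PySem.Str.strip ln ≠ "") :
    pvGood (PySem.Str.strip ln).toList := by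
  have h0 : (PySem.Str.strip ln).toList ≠ [] :=
    fun h0 => h (String.toList_inj.mp (by simpa using h0))
  rw [PySem.Str.toList_strip] at h0 ⊢
  exact pvGood_strip _ h0

-- the main loop correspondence
theorem pvLoop : ∀ (lines : List String) (init : List (List String)) (lastp : List String),
    (∀ p ∈ init, p ≠ []) →
    (∀ p ∈ init ++ [lastp], ∀ w ∈ p, pvGood w.toList) →
    (let ps := lines.foldl (fun paragraphs ln =>
      if PySem.Str.strip ln = "" then
        if PySem.List.pyGetD paragraphs (-1) [] ≠ [] then paragraphs ++ [[]] else paragraphs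
      else paragraphs.dropLast ++ [PySem.List.pyGetD paragraphs (-1) [] ++ [PySem.Str.strip ln]])
      (init ++ [lastp])
    let s := lines.foldl pvAltStep
      (PySem.Str.join "\n\n" (init.map (fun p => PySem.Str.join " " p)), PySem.Str.join " " lastp)
    PySem.Str.strip (PySem.Str.join "\n\n"
        ((ps.filter (fun p => p ≠ [])).map (fun p => PySem.Str.join " " p)))
      = (if s.2 ≠ "" then (if s.1 ≠ "" then s.1 ++ "\n\n" ++ s.2 else s.2) else s.1))
  | [], init, lastp, hinit, hgood => by
      intro ps s
      simp only [ps, s, List.foldl_nil]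
      have hfilt : init.filter (fun p => p ≠ []) = init :=
        List.filter_eq_self.mpr (by intro a ha; simpa using hinit a ha)
      by_cases hl : lastp = []
      · subst hl
        rw [pvJoin_nil]
        simp only [ne_eq, not_true_eq_false, if_false, List.filter_append, hfilt]
        norm_num
        by_cases hi : init = []
        · subst hi
          simp only [List.map_nil, pvJoin_nil]
          decide
        · exact pvStr_strip_good _
            (pvGoodOut init hi hinit (fun p hp => hgood p (List.mem_append_left _ hp)))
      · have hcg : pvGood (PySem.Str.join " " lastp).toList :=
          pvGoodPar lastp hl (hgood lastp (by simp))
        have hc : PySem.Str.join " " lastp ≠ "" := pvGood_ne _ hcg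
        rw [List.filter_append, hfilt]
        rw [if_pos hc]
        have hfl : List.filter (fun p => decide (p ≠ [])) [lastp] = [lastp] := by
          simp [hl]
        rw [hfl]
        by_cases hi : init = []
        · subst hi
          simp only [List.map_nil, pvJoin_nil, List.nil_append, List.map_cons]
          rw [if_neg (by simp), pvJoin_singleton]
          exact pvStr_strip_good _ hcg
        · have hog : pvGood (PySem.Str.join "\n\n"
              (init.map (fun p => PySem.Str.join " " p))).toList :=
            pvGoodOut init hi hinit (fun p hp => hgood p (List.mem_append_left _ hp))
          rw [if_pos (pvGood_ne _ hog)]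
          rw [List.map_append, List.map_cons, List.map_nil,
            pvJoin_append_singleton _ _ _ (by simpa using hi)]
          refine pvStr_strip_good _ ?_
          rw [String.toList_append, String.toList_append]
          exact pvGood_append_mid _ _ _ hog hcg
  | ln :: rest, init, lastp, hinit, hgood => by
      intro ps s
      simp only [ps, s, List.foldl_cons]
      clear ps s
      by_cases hb : PySem.Str.strip ln = ""
      · rw [if_pos hb, PySem.List.pyGetD_neg_one_append_singleton]
        by_cases hl : lastp = []
        · subst hl
          rw [if_neg (by simp)]
          have hstep : pvAltStep
              (PySem.Str.join "\n\n" (init.map (fun p => PySem.Str.join " " p)),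
               PySem.Str.join " " []) ln =
              (PySem.Str.join "\n\n" (init.map (fun p => PySem.Str.join " " p)),
               PySem.Str.join " " []) := by
            simp [pvAltStep, hb, pvJoin_nil]
          rw [hstep]
          exact pvLoop rest init [] hinit hgood
        · have hcg : pvGood (PySem.Str.join " " lastp).toList :=
            pvGoodPar lastp hl (hgood lastp (by simp))
          have hc : PySem.Str.join " " lastp ≠ "" := pvGood_ne _ hcg
          rw [if_pos hl]
          have hinit' : ∀ p ∈ init ++ [lastp], p ≠ [] := by
            intro p hp
            rcases List.mem_append.mp hp with h' | h'
            · exact hinit p h'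
            · simpa using (by simpa using h' : p = lastp) ▸ hl
          have hgood' : ∀ p ∈ (init ++ [lastp]) ++ [[]], ∀ w ∈ p, pvGood w.toList := by
            intro p hp
            rcases List.mem_append.mp hp with h' | h'
            · exact hgood p h'
            · intro w hw
              simp only [List.mem_singleton] at h'
              subst h'
              exact absurd hw (by simp)
          -- align the two B-states
          have hstep : pvAltStep
              (PySem.Str.join "\n\n" (init.map (fun p => PySem.Str.join " " p)),
               PySem.Str.join " " lastp) ln =
              (PySem.Str.join "\n\n" ((init ++ [lastp]).map (fun p => PySem.Str.join " " p)),
               PySem.Str.join " " []) := by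
            simp only [pvAltStep, hb, ne_eq, not_true_eq_false, if_false, hc,
              not_false_eq_true, if_true, pvJoin_nil]
            by_cases hi : init = []
            · subst hi
              simp [pvJoin_nil, pvJoin_singleton]
            · have hog : pvGood (PySem.Str.join "\n\n"
                  (init.map (fun p => PySem.Str.join " " p))).toList :=
                pvGoodOut init hi hinit (fun p hp => hgood p (List.mem_append_left _ hp))
              rw [List.map_append, List.map_cons, List.map_nil,
                pvJoin_append_singleton _ _ _ (by simpa using hi)]
              simp [pvGood_ne _ hog]
          rw [hstep]
          simpa using pvLoop rest (init ++ [lastp]) [] hinit' hgood'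
      · rw [if_neg hb, PySem.List.pyGetD_neg_one_append_singleton, List.dropLast_concat]
        have hwg : pvGood (PySem.Str.strip ln).toList := pvStr_good_strip ln hb
        have hgood' : ∀ p ∈ init ++ [lastp ++ [PySem.Str.strip ln]], ∀ w ∈ p, pvGood w.toList := by
          intro p hp w hw
          rcases List.mem_append.mp hp with h' | h'
          · exact hgood p (List.mem_append_left _ h') w hw
          · simp only [List.mem_singleton] at h'
            subst h'
            rcases List.mem_append.mp hw with h'' | h''
            · exact hgood lastp (by simp) w h''
            · simp only [List.mem_singleton] at h''
              subst h''
              exact hwg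
        have hstep : pvAltStep
            (PySem.Str.join "\n\n" (init.map (fun p => PySem.Str.join " " p)),
             PySem.Str.join " " lastp) ln =
            (PySem.Str.join "\n\n" (init.map (fun p => PySem.Str.join " " p)),
             PySem.Str.join " " (lastp ++ [PySem.Str.strip ln])) := by
          simp only [pvAltStep, hb, ne_eq, not_false_eq_true, if_true]
          by_cases hl : lastp = []
          · subst hl
            simp [pvJoin_nil, pvJoin_singleton]
          · have hc : PySem.Str.join " " lastp ≠ "" :=
              pvGood_ne _ (pvGoodPar lastp hl (hgood lastp (by simp)))
            rw [pvJoin_append_singleton _ _ _ hl]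
            simp [hc]
        rw [hstep]
        simpa using pvLoop rest init (lastp ++ [PySem.Str.strip ln]) hinit hgood'

-- ===== VERDICT (by name: the statement is the Claim_ definition above) =====
theorem join_paragraphs_py_spec : Claim_equal_join_paragraphs_py := by
  intro lines _
  have h := pvLoop lines [] [] (by simp) (by simp)
  simp only [List.nil_append, List.map_nil, pvJoin_nil] at h
  simp only [Spec_join_paragraphs_py, join_paragraphs_py, join_paragraphs_py_alt]
  exact congrArg pvPrettify h
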